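-- pv_equiv track=rewrite | github.com/wannabethere/asthera | complianceskill/app/ingestion/attacktocve/pipeline_frameworks.py | yaml_folders_for_pipeline_framework_id
-- ===== SOURCE A (Python) =====
-- from typing import List, Optional, Union
--
-- YAML_FOLDER_TO_PIPELINE_FRAMEWORK_ID: dict[str, str] = {
--     "cis_controls_v8_1": "cis_v8_1",
--     "nist_csf_2_0": "nist_csf_2_0",
--     "hipaa": "hipaa",
--     "soc2": "soc2",
--     "iso27001_2022": "iso27001",
--     "iso27001_2013": "iso27001",
-- }
--
-- def yaml_folders_for_pipeline_framework_id(framework_id: str) -> List[str]: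
--     """
--     Map pipeline framework_id (e.g. cis_v8_1, stored in Qdrant/metadata) to
--     risk_control_yaml directory name(s) under framework_helper.DEFAULT_BASE_PATH.
--     """
--     folders = [folder for folder, fid in YAML_FOLDER_TO_PIPELINE_FRAMEWORK_ID.items() if fid == framework_id]
--     if not folders:
--         if framework_id in YAML_FOLDER_TO_PIPELINE_FRAMEWORK_ID:
--             return [framework_id]
--         return []
--     if framework_id == "iso27001":
--         for pref in ("iso27001_2022", "iso27001_2013"):
--             if pref in folders:
--                 return [pref]
--     return [folders[0]]
-- ===== SOURCE B (Python) =====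
-- _FOLDER_BY_ID = {
--     "cis_v8_1": "cis_controls_v8_1",
--     "nist_csf_2_0": "nist_csf_2_0",
--     "hipaa": "hipaa",
--     "soc2": "soc2",
--     "iso27001": "iso27001_2022",
--     "cis_controls_v8_1": "cis_controls_v8_1",
--     "iso27001_2022": "iso27001_2022",
--     "iso27001_2013": "iso27001_2013",
-- }
--
-- def yaml_folders_for_pipeline_framework_id(framework_id):
--     folder = _FOLDER_BY_ID.get(framework_id)
--     return [folder] if folder is not None else []
-- ===== Notes on version B (the rewrite author's own statement) =====
-- stated objective: simpler
-- what changed: Replaced the scan over the folder->id dict plus the iso27001 tie-break loop and the folder-name fallback branch with one precomputed reverse lookup table consulted once.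
import Mathlib
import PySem

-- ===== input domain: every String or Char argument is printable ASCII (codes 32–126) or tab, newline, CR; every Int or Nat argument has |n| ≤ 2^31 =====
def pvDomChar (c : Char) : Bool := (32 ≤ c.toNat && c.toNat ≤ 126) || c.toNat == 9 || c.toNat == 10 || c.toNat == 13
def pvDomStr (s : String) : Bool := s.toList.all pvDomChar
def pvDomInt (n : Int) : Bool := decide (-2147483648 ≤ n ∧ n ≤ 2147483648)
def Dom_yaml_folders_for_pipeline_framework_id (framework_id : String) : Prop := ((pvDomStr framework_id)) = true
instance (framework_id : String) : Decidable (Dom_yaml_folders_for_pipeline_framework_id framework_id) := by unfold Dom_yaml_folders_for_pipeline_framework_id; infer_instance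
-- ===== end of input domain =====

-- B replaces A's dict scan + tie-break loop + key fallback by one precomputed reverse lookup table (simpler).

-- ===== PORT A =====
def YAML_FOLDER_TO_PIPELINE_FRAMEWORK_ID : PySem.Dict String String :=
  PySem.Dict.ofList [("cis_controls_v8_1", "cis_v8_1"), ("nist_csf_2_0", "nist_csf_2_0"),
    ("hipaa", "hipaa"), ("soc2", "soc2"), ("iso27001_2022", "iso27001"), ("iso27001_2013", "iso27001")]

def yaml_folders_for_pipeline_framework_id (framework_id : String) : List String :=
  let folders := (YAML_FOLDER_TO_PIPELINE_FRAMEWORK_ID.items.filter (fun p => p.2 == framework_id)).map (·.1)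
  if folders = [] then
    if YAML_FOLDER_TO_PIPELINE_FRAMEWORK_ID.contains framework_id then [framework_id] else []
  else if framework_id == "iso27001" then
    -- for pref in (...): if pref in folders: return [pref]; fall through to [folders[0]]
    if folders.contains "iso27001_2022" then ["iso27001_2022"]
    else if folders.contains "iso27001_2013" then ["iso27001_2013"]
    else [(PySem.List.pyGet? folders 0).getD ""]  -- folders[0]; folders ≠ [] here, so no IndexError
  else [(PySem.List.pyGet? folders 0).getD ""]    -- folders[0]; folders ≠ [] here, so no IndexError

-- ===== PORT B =====
def pvFolderById : PySem.Dict String String :=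
  PySem.Dict.ofList [("cis_v8_1", "cis_controls_v8_1"), ("nist_csf_2_0", "nist_csf_2_0"),
    ("hipaa", "hipaa"), ("soc2", "soc2"), ("iso27001", "iso27001_2022"),
    ("cis_controls_v8_1", "cis_controls_v8_1"), ("iso27001_2022", "iso27001_2022"),
    ("iso27001_2013", "iso27001_2013")]

def yaml_folders_for_pipeline_framework_id_alt (framework_id : String) : List String :=
  match pvFolderById.get? framework_id with
  | some folder => [folder]
  | none => []

-- ===== PRECONDITION & SPEC =====
def Spec_yaml_folders_for_pipeline_framework_id (framework_id : String) (out : List String) : Prop := out = yaml_folders_for_pipeline_framework_id_alt framework_id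
instance (framework_id : String) (out : List String) : Decidable (Spec_yaml_folders_for_pipeline_framework_id framework_id out) := by unfold Spec_yaml_folders_for_pipeline_framework_id; infer_instance

-- ===== CLAIM (what is proved, stated in full; the proofs are below) =====
def Claim_equal_yaml_folders_for_pipeline_framework_id : Prop := ∀ (framework_id : String), Dom_yaml_folders_for_pipeline_framework_id framework_id → Spec_yaml_folders_for_pipeline_framework_id framework_id (yaml_folders_for_pipeline_framework_id framework_id)

-- ===== LEMMAS AND PROOFS =====

-- ===== VERDICT (by name: the statement is the Claim_ definition above) =====
theorem yaml_folders_for_pipeline_framework_id_spec : Claim_equal_yaml_folders_for_pipeline_framework_id := by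
  intro s _
  unfold Spec_yaml_folders_for_pipeline_framework_id
  by_cases h1 : s = "cis_v8_1"; · subst h1; decide
  by_cases h2 : s = "nist_csf_2_0"; · subst h2; decide
  by_cases h3 : s = "hipaa"; · subst h3; decide
  by_cases h4 : s = "soc2"; · subst h4; decide
  by_cases h5 : s = "iso27001"; · subst h5; decide
  by_cases h6 : s = "cis_controls_v8_1"; · subst h6; decide
  by_cases h7 : s = "iso27001_2022"; · subst h7; decide
  by_cases h8 : s = "iso27001_2013"; · subst h8; decide
  simp [yaml_folders_for_pipeline_framework_id, yaml_folders_for_pipeline_framework_id_alt,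
    YAML_FOLDER_TO_PIPELINE_FRAMEWORK_ID, pvFolderById, PySem.Dict.ofList, PySem.Dict.update,
    PySem.Dict.insert, PySem.Dict.contains, PySem.Dict.get?, PySem.Dict.empty, List.foldl,
    Ne.symm h1, Ne.symm h2, Ne.symm h3, Ne.symm h4, Ne.symm h5, Ne.symm h6, Ne.symm h7, Ne.symm h8]
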